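/- GENERATED by mk_final_copies.py from the proof of the farm's unit `start_decoder.R14a` (farm:start_decoder.R14a.1: Proof.lean) as the
   re-elaboration sweep compiled it — do not edit. -/
import Asan.CheckWalk
import Vorbis.Spec.Reader
import Vorbis.Spec.Units.start_decoder_R14a

open X86 X86.User Asan Vorbis Vorbis.Spec Vorbis.Spec.StartDecoder

set_option maxRecDepth 4000
set_option maxHeartbeats 4000000

namespace Vorbis.Spec.start_decoder_R14a

/-- **Segment R14a of `start_decoder`** (`cut311` 0x11655f … 0x116576, returns into `cut312` 0x11657b): rbx = `&f->mode_config[i]`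
(`movsxd ; imul 6 ; lea`: `i < mode_count ≤ 64`, no wrap), `get_bits(f, 1)` with its precondition (`shadowPre_call`, `readerEnv_mid`,
`Bits` over the pushed return address); the loop assertion is carried over the push and the reader's footprint by `ModeLoop.carry`
(every window a `ModeWin`: the stack below the steady rsp, the reader's fields of `*f`), `Bits` from the reader's post; the result is
one bit. -/
theorem segR14a_walk {Lay : Layout} (hLay : Lay.hi = 0x1000000) {μ : Microarch} (hμ : UserX.MicroOK μ) {u₀ : State}
    (hcode : HasCodeNat Lay u₀ Vorbis.L.start_decoder.entry Vorbis.Code.code_start_decoder.nat Vorbis.L.start_decoder.size)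
    (h_get_bits : ∀ (others : List Obj) (frames : List (Nat × FrameLayout)) (Blk : Block → Prop) (len : Nat),
      Calls Lay μ Vorbis.WayInv (Vorbis.conv u₀) Vorbis.L.get_bits.entry (Vorbis.Spec.get_bits.spec others frames Blk len))
    {g : Ghost} {i : Nat} {v : State} {A : Arena × List Obj} (hb : BodyR14 u₀ g i A v) :
    ReachVia Lay μ WayInv v (fun w => AtR14a u₀ g i w) := by
  have hl := hb.loop
  have hpt := hl.secPt
  have hfr := hpt.frame
  have hh := hpt.hand
  have hm := hpt.mid
  have hp : Pos g A := hpt.pos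
  have he := hfr.entry
  v_entry he
  obtain ⟨hRa, hR8⟩ := hfr.r_eq
  simp only [steady, Ghost.RA] at hRa
  simp only [depth] at he_room he_stack
  have hflo := hp.f_lo
  have hf2 := hp.f_hi
  have hf3 := hp.f_stack
  simp only [Ghost.RA] at hf3
  have hRn : (addr g.R).toNat = g.R := toNat_addr _ (by omega)
  have hfn : (addr g.f).toNat = g.f := toNat_addr _ (by omega)
  have w_rip := hfr.rip
  have c_rsp := hfr.rsp
  have c_rbp := hpt.rbp
  have c_r14 := hl.r14
  have w_eq : Mem.EqOn Vorbis.L.textLo Vorbis.L.textHi u₀.mem v.mem := hfr.code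
  have hdf : v.flags .df = false := (show abiInv _ from hfr.inv).1
  have hmx : v.mxcsr &&& 0x1F80 = 0x1F80 := (show abiInv _ from hfr.inv).2
  have hsse := Vorbis.sseOK_of_abiInv hfr.inv
  have hgb := h_get_bits A.2 g.frames' (g.Blk A) g.len
  u_walk hcode [hμ.vendor] until [Vorbis.L.start_decoder.cut312] span [Vorbis.L.textLo, Vorbis.L.textHi] side (v_side)
  case call_inv => v_inv
  case pre_116576 =>
    have hun : ShadowUntouched v.mem s_116576.mem := by v_untouched
    have hs0 : Mem.SameExcept [⟨g.R - 8, g.R⟩] v.mem s_116576.mem := by u_same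
    have hbits := (Vorbis.Spec.Reader.reader_of_window hm.bits hs0 (by omega)).1
    refine ⟨⟨shadowPre_call hfr (by rw [w_rsp]; u_omega) hun, ?_, ?_⟩, ?_⟩
    · rw [w_rdi, hfn]
      exact readerEnv_mid hh hm
    · rw [w_rdi, hfn]
      exact hbits
    · rw [bitsArg_def, w_rsi]
      decide
  -- the returned state (0x11657b)
  v_after_call w_rsp_116576 w_mem_116576
  simp only [w_rdi_116576, hfn] at w_same
  have hs : Mem.SameExcept [⟨g.R - 360, g.R⟩, ⟨g.f + 48, g.f + 56⟩, ⟨g.f + 84, g.f + 96⟩, ⟨g.f + 136, g.f + 144⟩,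
      ⟨g.f + 1484, g.f + 1749⟩, ⟨g.f + 1752, g.f + 1784⟩] v.mem s_116576r.mem := by
    u_same
  have hws : ∀ w, w ∈ [(⟨g.R - 360, g.R⟩ : Span), ⟨g.f + 48, g.f + 56⟩, ⟨g.f + 84, g.f + 96⟩, ⟨g.f + 136, g.f + 144⟩,
      ⟨g.f + 1484, g.f + 1749⟩, ⟨g.f + 1752, g.f + 1784⟩] → ModeWin g i A w := by
    intro w hw
    simp only [List.mem_cons, List.mem_nil_iff, or_false] at hw
    unfold ModeWin
    rcases hw with rfl | rfl | rfl | rfl | rfl | rfl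
    · left
      simp only []
      omega
    · right; right; right; left
      simp only []
      omega
    · right; right; right; left
      simp only []
      omega
    · right; right; right; right; left
      simp only []
      omega
    · right; right; right; right; right; right; left
      simp only []
      omega
    · right; right; right; right; right; right; right; left
      simp only []
      omega
  have hpost : GetBitsSpecPost (g.Blk A) g.len (s_116576.reg .rdi).toNat (bitsArg s_116576) s_116576 s_116576r := w_post
  rw [w_rdi_116576, hfn, bitsArg_def, w_rsi_116576] at hpost
  have hun : ShadowUntouched v.mem s_116576r.mem := by v_untouched
  have hl' : ModeLoop u₀ g Vorbis.L.start_decoder.cut312 i A s_116576r :=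
    hl.carry hs hun hws hpost.bits.bits w_rip w_rsp (Vorbis.conv_code_eqOn w_code) w_inv (w_kept.get .rbp rfl)
      (w_kept.get .r14 rfl)
  -- `i < mode_count ≤ 64`: rbx = f + 484 + 6·i
  have hlt := hb.lt
  have hmd := hl.modes.MD1
  have hsx : Word.ofBV (BitVec.signExtend 64 (Word.part Width.w32 (addr i))) = addr i := cnt32_sext i (by omega)
  have hrbx : s_116576r.reg .rbx = addr (stb_vorbis.mode_config_at g.f i) := by
    have hi64 : i < 64 := by omega
    have e6 : addr i * 6 = addr (6 * i) := by
      apply eq_addr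
      have e : (6 : UInt64).toNat = 6 := rfl
      rw [UInt64.toNat_mul, toNat_addr i (by omega), e]
      omega
    have eo : g.f + 6 * i + 484 = stb_vorbis.mode_config_at g.f i := by
      simp only [vacc, voff]
      omega
    rw [w_rbx, hsx, e6, addr_add_addr, addr_add_lit, eo]
  have hlt' : (i : Int) < stb_vorbis.mode_count s_116576r.mem g.f := by
    have h1 := hl'.modes.MD1
    have e : stb_vorbis.mode_count s_116576r.mem g.f = stb_vorbis.mode_count v.mem g.f := by
      simp only [vacc, voff]
      have E : Mem.EqOn (g.f + 480) (g.f + 484) v.mem s_116576r.mem := by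
        apply hs.eqOn
        intro w hw
        simp only [List.mem_cons, List.mem_nil_iff, or_false] at hw
        rcases hw with rfl | rfl | rfl | rfl | rfl | rfl <;> simp only [] <;> omega
      exact E.i32 _ (by omega) (by omega) (by omega)
    rw [e]
    exact hlt
  refine ReachVia.done ⟨A, ⟨hl', hlt', hrbx⟩, ?_⟩
  exact hpost.bits.result.2 (by decide)

end Vorbis.Spec.start_decoder_R14a

/-- The unit `start_decoder.R14a`: `segR14a_walk` at every entry state. -/
theorem Vorbis.Spec.Worked.start_decoder_R14a_ok : Vorbis.Spec.start_decoder_R14a.Statement := by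
  intro Lay hLay μ hμ u₀ hcode h_get_bits g i v hat
  obtain ⟨A, hb⟩ := hat
  exact Vorbis.Spec.start_decoder_R14a.segR14a_walk hLay hμ hcode h_get_bits hb
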